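-- pv_equiv track=rewrite | github.com/AdamZhouSE/pythonHomework | Code/CodeRecords/2739/60727/249392.py | solution
-- ===== SOURCE A (Python) =====
-- def solution(n,k):
--     res=[]
--     for i in range(1,7):
--         for j in range(i+1,9):
--             for m in range(j+1,10):
--                 if i+j+m==n:
--                     li=[]
--                     li.append(i)
--                     li.append(j)
--                     li.append(m)
--                     res.append(li)
--     return res
-- ===== SOURCE B (Python) =====
-- def solution(n, k):
--     return [[i, j, n - i - j]
--             for i in range(1, 7)
--             for j in range(i + 1, 9)
--             if j < n - i - j <= 9]
-- ===== Notes on version B (the rewrite author's own statement) =====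
-- stated objective: simpler
-- what changed: Replaces the triple nested loop with accumulator by a single flat list comprehension over (i,j) pairs that computes m = n-i-j arithmetically and filters with j < m <= 9, eliminating the innermost scan and the mutable accumulator.
import Mathlib
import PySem

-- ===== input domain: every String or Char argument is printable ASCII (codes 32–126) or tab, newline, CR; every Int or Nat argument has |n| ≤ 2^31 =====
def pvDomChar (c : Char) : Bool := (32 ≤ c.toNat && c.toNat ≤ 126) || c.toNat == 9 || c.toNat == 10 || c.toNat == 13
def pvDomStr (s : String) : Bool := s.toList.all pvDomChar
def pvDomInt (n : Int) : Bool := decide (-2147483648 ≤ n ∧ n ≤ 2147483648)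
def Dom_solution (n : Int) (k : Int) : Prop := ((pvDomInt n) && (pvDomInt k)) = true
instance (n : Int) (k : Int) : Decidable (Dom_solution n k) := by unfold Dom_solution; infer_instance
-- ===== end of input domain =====

-- B replaces the triple nested accumulator loop by one flat comprehension over (i,j)
-- that computes m = n-i-j arithmetically and filters with j < m ≤ 9 (simpler).
-- ===== PORT A =====
def solution (n : Int) (k : Int) : List (List Int) :=
  (PySem.List.pyRange 1 7 1).foldl (fun res i =>
    (PySem.List.pyRange (i+1) 9 1).foldl (fun res j =>
      (PySem.List.pyRange (j+1) 10 1).foldl (fun res m =>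
        if i + j + m = n then res ++ [[i, j, m]] else res) res) res) []

-- ===== PORT B =====
def solution_alt (n : Int) (k : Int) : List (List Int) :=
  (PySem.List.pyRange 1 7 1).flatMap (fun i =>
    ((PySem.List.pyRange (i+1) 9 1).filter
        (fun j => decide (j < n - i - j ∧ n - i - j ≤ 9))).map
      (fun j => [i, j, n - i - j]))

-- ===== PRECONDITION & SPEC =====
def Spec_solution (n : Int) (k : Int) (out : List (List Int)) : Prop := out = solution_alt n k
instance (n : Int) (k : Int) (out : List (List Int)) : Decidable (Spec_solution n k out) := by unfold Spec_solution; infer_instance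

-- ===== CLAIM =====
def Claim_equal_solution : Prop := ∀ (n : Int) (k : Int), Dom_solution n k → Spec_solution n k (solution n k)

-- ===== LEMMAS AND PROOFS =====

theorem foldl_id_of_const {α β : Type} (g : α → β → α) (l : List β) (a : α)
    (h : ∀ acc x, x ∈ l → g acc x = acc) : l.foldl g a = a := by
  induction l generalizing a with
  | nil => rfl
  | cons y ys ih =>
    simp only [List.foldl_cons]
    rw [h a y (by simp)]
    exact ih a (fun acc x hx => h acc x (by simp [hx]))

theorem solution_empty (n k : Int) (h : n < 6 ∨ 23 < n) : solution n k = [] := by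
  unfold solution
  apply foldl_id_of_const
  intro acc i hi
  rw [PySem.List.mem_pyRange_one] at hi
  apply foldl_id_of_const
  intro acc2 j hj
  rw [PySem.List.mem_pyRange_one] at hj
  apply foldl_id_of_const
  intro acc3 m hm
  rw [PySem.List.mem_pyRange_one] at hm
  rw [if_neg]
  omega

theorem solution_alt_empty (n k : Int) (h : n < 6 ∨ 23 < n) : solution_alt n k = [] := by
  unfold solution_alt
  rw [List.flatMap_eq_nil_iff]
  intro i hi
  rw [PySem.List.mem_pyRange_one] at hi
  rw [List.map_eq_nil_iff, List.filter_eq_nil_iff]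
  intro j hj
  rw [PySem.List.mem_pyRange_one] at hj
  simp only [decide_eq_true_eq]
  omega

-- ===== VERDICT =====
theorem solution_spec : Claim_equal_solution := by
  intro n k _
  unfold Spec_solution
  by_cases h : 6 ≤ n ∧ n ≤ 23
  · obtain ⟨h1, h2⟩ := h
    interval_cases n <;> rfl
  · rw [solution_empty n k (by omega), solution_alt_empty n k (by omega)]
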